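-- pv_equiv track=rewrite | github.com/alejoriosm04/university-repository | Data-structure-and-algorithms-I/workshops/seguimiento-2/seguimiento-2.2/nota.py | nota
-- ===== SOURCE A (Python) =====
-- def nota(m, n, m_words, n_words):
--     diccionario = dict()
--     counter = 0
--     for i in range(len(m_words)):
--         diccionario[m_words[i]] = 1
--
--     for i in range(len(n_words)):
--         if n_words[i] in diccionario:
--             diccionario[n_words[i]] = 2
--         else:
--             diccionario[n_words[i]] = 1
--
--     for value in diccionario.values():
--         if value == 2:
--             counter+=1
--
--     if counter == len(n_words):
--         return "Si"
--     else:
--         return "No"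
-- ===== SOURCE B (Python) =====
-- def nota(m, n, m_words, n_words):
--     mset = set(m_words)
--     seen = set()
--     for word in n_words:
--         if word in seen or word not in mset:
--             return "No"
--         seen.add(word)
--     return "Si"
-- ===== Notes on version B (the rewrite author's own statement) =====
-- stated objective: simpler
-- what changed: Replaces A's three passes (populate a dict with 1s, mark overlaps as 2, count the 2s and compare to len(n_words)) by one early-exiting pass over n_words that keeps a 'seen' set and rejects on a duplicate or a word missing from set(m_words).
import Mathlib
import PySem

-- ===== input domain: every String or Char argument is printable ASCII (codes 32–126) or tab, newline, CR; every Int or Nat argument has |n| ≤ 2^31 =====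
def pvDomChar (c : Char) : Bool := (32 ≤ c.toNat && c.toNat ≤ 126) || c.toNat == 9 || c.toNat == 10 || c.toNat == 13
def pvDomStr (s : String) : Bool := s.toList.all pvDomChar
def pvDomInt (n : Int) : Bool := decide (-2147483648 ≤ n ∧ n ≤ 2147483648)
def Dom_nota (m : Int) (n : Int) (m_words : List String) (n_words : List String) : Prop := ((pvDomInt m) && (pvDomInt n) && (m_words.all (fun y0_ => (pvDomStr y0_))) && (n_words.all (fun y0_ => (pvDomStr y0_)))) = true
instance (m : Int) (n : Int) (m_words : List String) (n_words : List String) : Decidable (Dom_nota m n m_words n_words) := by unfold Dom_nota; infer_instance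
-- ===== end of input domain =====

-- B replaces A's three passes (dict of 1s, mark overlaps as 2, count the 2s) by one
-- early-exiting pass over n_words with a 'seen' set; same return value everywhere.

-- ===== PORT A =====
def nota (m : Int) (n : Int) (m_words : List String) (n_words : List String) : String :=
  let d1 : PySem.Dict String Int :=
    (PySem.List.pyRange 0 (m_words.length : Int) 1).foldl
      (fun d i => d.insert (PySem.List.pyGetD m_words i "") 1) PySem.Dict.empty
  let d2 : PySem.Dict String Int :=
    (PySem.List.pyRange 0 (n_words.length : Int) 1).foldl
      (fun d i =>
        if d.contains (PySem.List.pyGetD n_words i "") then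
          d.insert (PySem.List.pyGetD n_words i "") 2
        else
          d.insert (PySem.List.pyGetD n_words i "") 1) d1
  let counter : Int := d2.values.foldl (fun c v => if v == 2 then c + 1 else c) 0
  if counter = (n_words.length : Int) then "Si" else "No"

-- ===== PORT B =====
-- helper: the early-exiting loop over n_words with the 'seen' set
def notaGo (mset : PySem.Set String) (seen : PySem.Set String) : List String → String
  | [] => "Si"
  | w :: ws =>
    if seen.contains w || !(mset.contains w) then "No"
    else notaGo mset (seen.add w) ws

def nota_alt (m : Int) (n : Int) (m_words : List String) (n_words : List String) : String :=
  notaGo (PySem.Set.ofList m_words) PySem.Set.empty n_words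

-- ===== PRECONDITION & SPEC =====
def Spec_nota (m : Int) (n : Int) (m_words : List String) (n_words : List String) (out : String) : Prop := out = nota_alt m n m_words n_words
instance (m : Int) (n : Int) (m_words : List String) (n_words : List String) (out : String) : Decidable (Spec_nota m n m_words n_words out) := by unfold Spec_nota; infer_instance

-- ===== CLAIM (what is proved, stated in full; the proofs are below) =====
def Claim_equal_nota : Prop := ∀ (m : Int) (n : Int) (m_words : List String) (n_words : List String), Dom_nota m n m_words n_words → Spec_nota m n m_words n_words (nota m n m_words n_words)

-- ===== LEMMAS AND PROOFS =====

-- the body of A's second loop is a single insert of an if-valued entry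
theorem notaStep_eq (d : PySem.Dict String Int) (w : String) :
    (if d.contains w then d.insert w 2 else d.insert w 1)
      = d.insert w (if d.contains w then 2 else 1) := by
  by_cases h : d.contains w = true <;> simp [h]

-- A's first loop never stores the value 2
theorem fold1_getD_ne_two (ms : List String) (d : PySem.Dict String Int) (w : String)
    (h : d.getD w 0 ≠ 2) :
    (ms.foldl (fun d x => d.insert x 1) d).getD w 0 ≠ 2 := by
  induction ms generalizing d with
  | nil => exact h
  | cons x t ih =>
    simp only [List.foldl_cons]
    apply ih
    rw [PySem.Dict.getD_insert]
    split <;> simp_all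

-- characterisation of the value 2 after A's second loop (any starting dict)
theorem fold2_getD_two (ws : List String) (d : PySem.Dict String Int) (w : String) :
    ((ws.foldl (fun d x => if d.contains x then d.insert x 2 else d.insert x 1) d).getD w 0 = 2)
      ↔ ((w ∈ ws ∧ (d.contains w = true ∨ 2 ≤ ws.count w)) ∨ d.getD w 0 = 2) := by
  induction ws generalizing d with
  | nil => simp
  | cons x t ih =>
    simp only [List.foldl_cons]
    rw [ih]
    by_cases hx : w = x
    · subst hx
      by_cases hc : d.contains w = true
      · have h2 : (d.insert w 2).getD w 0 = (2 : Int) := by rw [PySem.Dict.getD_insert]; simp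
        have hct : (d.insert w 2).contains w = true := PySem.Dict.contains_insert_self d w 2
        simp [hc, h2, hct]
      · have hcf : d.contains w = false := by simpa using hc
        have h1 : (d.insert w 1).getD w 0 = (1 : Int) := by rw [PySem.Dict.getD_insert]; simp
        have hct : (d.insert w 1).contains w = true := PySem.Dict.contains_insert_self d w 1
        have hd0 : d.getD w 0 = 0 := PySem.Dict.getD_of_not_contains d 0 hcf
        rw [if_neg hc]
        constructor
        · rintro (⟨hm, _⟩ | hone)
          · refine Or.inl ⟨List.mem_cons_self, Or.inr ?_⟩
            have := List.count_pos_iff.mpr hm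
            rw [List.count_cons_self]; omega
          · rw [h1] at hone; exact absurd hone (by decide)
        · rintro (⟨_, hor⟩ | h2')
          · rcases hor with hcw | hcnt
            · rw [hcf] at hcw; exact absurd hcw (by decide)
            · have hmt : w ∈ t := by
                by_contra hnt
                rw [List.count_cons_self, List.count_eq_zero_of_not_mem hnt] at hcnt; omega
              exact Or.inl ⟨hmt, Or.inl hct⟩
          · rw [hd0] at h2'; exact absurd h2' (by decide)
    · have hx2 : ¬ x = w := fun h => hx h.symm
      have hget : ∀ v : Int, (d.insert x v).getD w 0 = d.getD w 0 := by
        intro v; rw [PySem.Dict.getD_insert]; simp [hx]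
      have hcon : ∀ v : Int, (d.insert x v).contains w = d.contains w := by
        intro v; rw [PySem.Dict.contains_insert]; simp [hx]
      by_cases hc : d.contains x = true <;>
        simp [hc, hget, hcon, hx, hx2, List.mem_cons]

-- counting a value in d.values is counting keys whose stored value is it
theorem values_count_eq_keys_countP (d : PySem.Dict String Int) (h : d.keys.Nodup) :
    d.values.count (2 : Int) = d.keys.countP (fun k => d.getD k 0 == 2) := by
  have hv : d.values = d.items.map (·.2) := rfl
  have hk : d.keys = d.items.map (·.1) := rfl
  rw [hv, hk, List.count_eq_countP, List.countP_map, List.countP_map]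
  apply List.countP_congr
  intro p hp
  have := PySem.Dict.getD_of_mem_items d (k := p.1) (v := p.2) (by simpa using hp) h 0
  simp [Function.comp, this]

-- B's loop returns "Si" exactly on a duplicate-free suffix of fresh words all inside mset
theorem notaGo_eq (mset : PySem.Set String) (ws : List String) (seen : PySem.Set String) :
    notaGo mset seen ws
      = if ws.Nodup ∧ ∀ w ∈ ws, w ∉ seen ∧ w ∈ mset then "Si" else "No" := by
  induction ws generalizing seen with
  | nil => simp [notaGo]
  | cons x t ih =>
    rw [notaGo, ih]
    by_cases hs : x ∈ seen
    · have hcs : seen.contains x = true := (PySem.Set.contains_iff seen x).mpr hs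
      simp [hs]
    · by_cases hm : x ∈ mset
      · have h1 : seen.contains x = false := by
          rw [← Bool.not_eq_true]; simpa [PySem.Set.contains_iff] using hs
        have h2 : mset.contains x = true := (PySem.Set.contains_iff mset x).mpr hm
        rw [h1, h2]
        simp only [Bool.not_true, Bool.or_false]
        rw [if_neg (by decide : ¬ (false = true))]
        apply if_congr _ rfl rfl
        constructor
        · rintro ⟨hndt, hall⟩
          have hxt : x ∉ t := fun hxt =>
            (hall x hxt).1 ((PySem.Set.mem_add seen x x).mpr (Or.inr rfl))
          refine ⟨List.nodup_cons.mpr ⟨hxt, hndt⟩, fun w hw => ?_⟩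
          rcases List.mem_cons.mp hw with rfl | hw'
          · exact ⟨hs, hm⟩
          · exact ⟨fun hc => (hall w hw').1 ((PySem.Set.mem_add seen x w).mpr (Or.inl hc)),
              (hall w hw').2⟩
        · rintro ⟨hnd, hall⟩
          rcases List.nodup_cons.mp hnd with ⟨hxt, hndt⟩
          refine ⟨hndt, fun w hw => ?_⟩
          have h := hall w (List.mem_cons_of_mem x hw)
          refine ⟨fun hc => ?_, h.2⟩
          rcases (PySem.Set.mem_add seen x w).mp hc with h' | rfl
          · exact h.1 h'
          · exact hxt hw
      · have h2 : mset.contains x = false := by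
          rw [← Bool.not_eq_true]; simpa [PySem.Set.contains_iff] using hm
        simp [hm]

-- a first-occurrence dedup with full length means the list had no duplicates
theorem nodup_of_ofList_length (xs : List String)
    (h : (PySem.Set.ofList xs).length = xs.length) : xs.Nodup := by
  have hperm : (PySem.Set.ofList xs).Perm xs.dedup := by
    rw [List.perm_ext_iff_of_nodup (PySem.Set.nodup_ofList xs) (List.nodup_dedup xs)]
    intro a; simp [PySem.Set.mem_ofList, List.mem_dedup]
  have hlen : xs.dedup.length = xs.length := by rw [← hperm.length_eq]; exact h
  exact List.dedup_eq_self.mp (List.Sublist.eq_of_length (List.dedup_sublist xs) hlen)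

-- the counting condition of A is B's condition
theorem count_cond_iff (m_words n_words : List String) :
    ((PySem.Set.ofList (m_words ++ n_words)).countP
        (fun k => decide (k ∈ n_words ∧ (k ∈ m_words ∨ 2 ≤ n_words.count k)))
      = n_words.length)
      ↔ (n_words.Nodup ∧ ∀ w ∈ n_words, w ∈ m_words) := by
  set P : String → Bool :=
    fun k => decide (k ∈ n_words ∧ (k ∈ m_words ∨ 2 ≤ n_words.count k)) with hP
  have hswap : (PySem.Set.ofList (m_words ++ n_words)).countP P
      = (PySem.Set.ofList n_words).countP P := by
    have h1 : ((PySem.Set.ofList (m_words ++ n_words)).filter P).Perm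
        ((PySem.Set.ofList n_words).filter P) := by
      rw [List.perm_ext_iff_of_nodup
        ((PySem.Set.nodup_ofList _).filter P) ((PySem.Set.nodup_ofList _).filter P)]
      intro a
      simp only [List.mem_filter, PySem.Set.mem_ofList, List.mem_append, hP,
        decide_eq_true_eq]
      constructor
      · rintro ⟨_, h⟩; exact ⟨h.1, h⟩
      · rintro ⟨h, h'⟩; exact ⟨Or.inr h, h'⟩
    rw [List.countP_eq_length_filter, List.countP_eq_length_filter, h1.length_eq]
  rw [hswap]
  constructor
  · intro h
    have hle1 := List.countP_le_length (p := P) (l := PySem.Set.ofList n_words)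
    have hle2 := PySem.Set.length_ofList_le n_words
    have hlen : (PySem.Set.ofList n_words).length = n_words.length := by omega
    have hnd : n_words.Nodup := nodup_of_ofList_length n_words hlen
    refine ⟨hnd, ?_⟩
    have hall : ∀ a ∈ PySem.Set.ofList n_words, P a = true :=
      List.countP_eq_length.mp (by omega)
    intro w hw
    have hw' := hall w ((PySem.Set.mem_ofList n_words w).mpr hw)
    rw [hP] at hw'
    simp only [decide_eq_true_eq] at hw'
    rcases hw'.2 with h' | h'
    · exact h'
    · exact absurd h' (by have := List.nodup_iff_count_le_one.mp hnd w; omega)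
  · rintro ⟨hnd, hall⟩
    rw [PySem.Set.ofList_eq_self_of_nodup n_words hnd]
    exact List.countP_eq_length.mpr fun a ha => by
      rw [hP]; exact decide_eq_true ⟨ha, Or.inl (hall a ha)⟩

-- A computes "Si" exactly on B's condition
theorem nota_eq_if (m n : Int) (m_words n_words : List String) :
    nota m n m_words n_words
      = if n_words.Nodup ∧ ∀ w ∈ n_words, w ∈ m_words then "Si" else "No" := by
  have e1 : (PySem.List.pyRange 0 (m_words.length : Int) 1).foldl
      (fun (d : PySem.Dict String Int) i => d.insert (PySem.List.pyGetD m_words i "") 1)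
        PySem.Dict.empty
      = m_words.foldl (fun (d : PySem.Dict String Int) x => d.insert x 1)
          PySem.Dict.empty := by
    have h := PySem.List.foldl_pyRange_pyGetD' m_words ""
      (fun (d : PySem.Dict String Int) x => d.insert x 1) PySem.Dict.empty
      (le_refl (0 : Int))
    simpa using h
  have e2 : ∀ d0 : PySem.Dict String Int,
      (PySem.List.pyRange 0 (n_words.length : Int) 1).foldl
        (fun (d : PySem.Dict String Int) i =>
          if d.contains (PySem.List.pyGetD n_words i "") then
            d.insert (PySem.List.pyGetD n_words i "") 2
          else d.insert (PySem.List.pyGetD n_words i "") 1) d0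
      = n_words.foldl
          (fun (d : PySem.Dict String Int) x =>
            if d.contains x then d.insert x 2 else d.insert x 1) d0 := by
    intro d0
    have h := PySem.List.foldl_pyRange_pyGetD' n_words ""
      (fun (d : PySem.Dict String Int) x =>
        if d.contains x then d.insert x 2 else d.insert x 1) d0 (le_refl (0 : Int))
    simpa using h
  unfold nota
  simp only [e1, e2]
  set d1 := m_words.foldl (fun (d : PySem.Dict String Int) x => d.insert x 1)
      PySem.Dict.empty with hd1
  set d2 := n_words.foldl
      (fun (d : PySem.Dict String Int) x =>
        if d.contains x then d.insert x 2 else d.insert x 1) d1 with hd2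
  have hk1 : d1.keys = PySem.Set.ofList m_words := by
    rw [hd1, PySem.Dict.keys_foldl_insert m_words (fun _ _ => (1 : Int)) PySem.Dict.empty,
        PySem.Dict.keys_empty, PySem.Set.update_nil_left]
  have hstep : (fun (d : PySem.Dict String Int) x =>
      if d.contains x then d.insert x 2 else d.insert x 1)
      = (fun d x => d.insert x (if d.contains x then 2 else 1)) := by
    funext d x; exact notaStep_eq d x
  have hk2 : d2.keys = PySem.Set.ofList (m_words ++ n_words) := by
    rw [hd2, hstep,
        PySem.Dict.keys_foldl_insert n_words
          (fun d x => if d.contains x then 2 else 1) d1,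
        hk1, PySem.Set.ofList_append]
  have hnd2 : d2.keys.Nodup := by rw [hk2]; exact PySem.Set.nodup_ofList _
  have hc1 : ∀ w, d1.contains w = true ↔ w ∈ m_words := by
    intro w
    rw [PySem.Dict.contains_eq_decide_mem_keys, hk1, decide_eq_true_eq,
        PySem.Set.mem_ofList]
  have hne1 : ∀ w, d1.getD w 0 ≠ 2 := fun w =>
    fold1_getD_ne_two m_words PySem.Dict.empty w (by rw [PySem.Dict.getD_empty]; decide)
  have hcnt : d2.values.count (2 : Int)
      = (PySem.Set.ofList (m_words ++ n_words)).countP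
          (fun k => decide (k ∈ n_words ∧ (k ∈ m_words ∨ 2 ≤ n_words.count k))) := by
    rw [values_count_eq_keys_countP d2 hnd2, ← hk2]
    apply List.countP_congr
    intro k _
    simp only [beq_iff_eq, decide_eq_true_eq]
    rw [hd2, fold2_getD_two n_words d1 k]
    constructor
    · rintro (⟨h1, h2⟩ | h)
      · exact ⟨h1, h2.imp (fun h => (hc1 k).mp h) id⟩
      · exact absurd h (hne1 k)
    · rintro ⟨h1, h2⟩
      exact Or.inl ⟨h1, h2.imp (fun h => (hc1 k).mpr h) id⟩
  rw [PySem.List.foldl_beq_add_one d2.values 2 0, hcnt]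
  apply if_congr _ rfl rfl
  rw [zero_add, show ((n_words.length : Int)) = ((n_words.length : Nat) : Int) from rfl,
      Int.natCast_inj]
  exact count_cond_iff m_words n_words

-- B computes "Si" on the same condition
theorem nota_alt_eq_if (m n : Int) (m_words n_words : List String) :
    nota_alt m n m_words n_words
      = if n_words.Nodup ∧ ∀ w ∈ n_words, w ∈ m_words then "Si" else "No" := by
  unfold nota_alt
  rw [notaGo_eq]
  apply if_congr _ rfl rfl
  constructor
  · rintro ⟨h1, h2⟩
    exact ⟨h1, fun w hw => (PySem.Set.mem_ofList m_words w).mp (h2 w hw).2⟩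
  · rintro ⟨h1, h2⟩
    refine ⟨h1, fun w hw => ⟨?_, (PySem.Set.mem_ofList m_words w).mpr (h2 w hw)⟩⟩
    intro h
    simp [PySem.Set.empty] at h

-- ===== VERDICT (by name: the statement is the Claim_ definition above) =====
theorem nota_spec : Claim_equal_nota := by
  intro m n m_words n_words _
  unfold Spec_nota
  rw [nota_eq_if, nota_alt_eq_if]
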